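-- pv_equiv track=rewrite | github.com/nchen01/brain | brain-mvp/src/docforge/rag/rag_database_preparation.py | _create_chunk_summary_text
-- ===== SOURCE A (Python) =====
-- from typing import Dict, List, Optional, Any, Union, Tuple, Set
--
-- def _create_chunk_summary_text(chunks: List[Dict[str, Any]]) -> str:
--     """Create summary text from chunks for indexing."""
--     if not chunks:
--         return ""
--
--     # Group chunks by document
--     doc_chunks = {}
--     for chunk in chunks:
--         doc_uuid = chunk['meta_doc_uuid']
--         if doc_uuid not in doc_chunks:
--             doc_chunks[doc_uuid] = []
--         doc_chunks[doc_uuid].append(chunk)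
--
--     text_parts = []
--     for doc_uuid, doc_chunks_list in doc_chunks.items():
--         title = doc_chunks_list[0].get('title', 'Unknown Document')
--         chunk_count = len(doc_chunks_list)
--
--         text_parts.append(
--             f"Document '{title}' contains {chunk_count} chunks covering various topics."
--         )
--
--     return "\n".join(text_parts)
-- ===== SOURCE B (Python) =====
-- from typing import Dict, List, Optional, Any, Union, Tuple, Set
--
--
-- def _create_chunk_summary_text(chunks: List[Dict[str, Any]]) -> str:
--     """Create summary text from chunks for indexing."""
--     if not chunks:
--         return ""
--
--     # Staged passes instead of grouping: first the distinct doc uuids in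
--     # first-seen order, then one scan of `chunks` per document for its
--     # first chunk (title source) and its chunk count.
--     order = list(dict.fromkeys(chunk['meta_doc_uuid'] for chunk in chunks))
--
--     text_parts = []
--     for doc_uuid in order:
--         first = next(c for c in chunks if c['meta_doc_uuid'] == doc_uuid)
--         chunk_count = sum(1 for c in chunks if c['meta_doc_uuid'] == doc_uuid)
--         text_parts.append(
--             f"Document '{first.get('title', 'Unknown Document')}' contains {chunk_count} chunks covering various topics."
--         )
--
--     return "\n".join(text_parts)
-- ===== Notes on version B (the rewrite author's own statement) =====
-- stated objective: alternative
-- what changed: A groups chunks into per-document lists in a dict and emits one line per group; B never builds any grouping structure: it deduplicates the uuid sequence to get the documents in first-seen order, then rescans the chunk list per document for the first matching chunk and the match count, trading O(n) space for O(n*d) time; Pre_ excludes chunks missing the 'meta_doc_uuid' key, on which both A and B raise KeyError.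
import Mathlib
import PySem

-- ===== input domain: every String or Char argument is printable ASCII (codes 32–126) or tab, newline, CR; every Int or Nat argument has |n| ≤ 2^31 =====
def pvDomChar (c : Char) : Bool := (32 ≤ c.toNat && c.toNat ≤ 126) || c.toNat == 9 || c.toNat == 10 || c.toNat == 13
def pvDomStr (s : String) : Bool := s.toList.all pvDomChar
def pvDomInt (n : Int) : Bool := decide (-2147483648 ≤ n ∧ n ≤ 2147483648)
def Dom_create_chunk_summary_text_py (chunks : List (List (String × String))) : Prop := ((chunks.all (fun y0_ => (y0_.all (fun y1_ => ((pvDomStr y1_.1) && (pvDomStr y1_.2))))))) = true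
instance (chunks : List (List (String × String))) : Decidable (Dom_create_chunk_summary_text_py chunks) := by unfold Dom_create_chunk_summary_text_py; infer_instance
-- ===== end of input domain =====

-- B drops A's per-document grouping dict entirely: it dedups the uuid sequence, then rescans the
-- chunk list per document for the first match and the match count (alternative decomposition).

-- shared transliteration helpers: chunk['meta_doc_uuid'] (total via getD; Pre_ guarantees the key
-- is present, so the "" default is never read), chunk.get('title', 'Unknown Document'), and the f-string
def pvKey (chunk : List (String × String)) : String :=
  ((PySem.Dict.mk chunk).get? "meta_doc_uuid").getD ""
def pvTitle (chunk : List (String × String)) : String :=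
  ((PySem.Dict.mk chunk).get? "title").getD "Unknown Document"
def pvLine (title : String) (n : Int) : String :=
  PySem.Str.join "" ["Document '", title, "' contains ", PySem.Int.toStr n, " chunks covering various topics."]

-- ===== PORT A =====
-- loop body: if doc_uuid not in doc_chunks: doc_chunks[doc_uuid] = [] ; doc_chunks[doc_uuid].append(chunk)
def pvStepA (d : PySem.Dict String (List (List (String × String)))) (chunk : List (String × String)) :
    PySem.Dict String (List (List (String × String))) :=
  let doc_uuid := pvKey chunk
  let d := if d.contains doc_uuid then d else d.insert doc_uuid []
  d.modify doc_uuid [] (fun l => l ++ [chunk])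

def create_chunk_summary_text_py (chunks : List (List (String × String))) : String :=
  if chunks = [] then "" else
  -- group chunks by document
  let doc_chunks : PySem.Dict String (List (List (String × String))) :=
    chunks.foldl pvStepA PySem.Dict.empty
  let text_parts : List String :=
    doc_chunks.items.foldl (fun ps p =>
      -- doc_chunks_list[0]: the group list is nonempty by construction, headD's default is never read
      ps ++ [pvLine (pvTitle (p.2.headD [])) (p.2.length : Int)]) []
  PySem.Str.join "\n" text_parts

-- ===== PORT B =====
def create_chunk_summary_text_py_alt (chunks : List (List (String × String))) : String :=
  if chunks = [] then "" else
  -- list(dict.fromkeys(...)): distinct uuids, first-seen order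
  let order : List String := PySem.List.dedup (chunks.map pvKey)
  let text_parts : List String :=
    order.foldl (fun ps doc_uuid =>
      -- next(...): a match always exists (doc_uuid comes from chunks), so getD's default is never read
      let first := (chunks.find? (fun c => pvKey c == doc_uuid)).getD []
      let chunk_count := chunks.countP (fun c => pvKey c == doc_uuid)
      ps ++ [pvLine (pvTitle first) (chunk_count : Int)]) []
  PySem.Str.join "\n" text_parts

-- ===== PRECONDITION & SPEC =====
-- Pre_ excludes exactly the chunks with no 'meta_doc_uuid' key: there chunk['meta_doc_uuid'] raises KeyError in A (and in B)
def Pre_create_chunk_summary_text_py (chunks : List (List (String × String))) : Prop :=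
  ∀ c ∈ chunks, (c.any (fun p => p.1 == "meta_doc_uuid")) = true
instance (chunks : List (List (String × String))) : Decidable (Pre_create_chunk_summary_text_py chunks) := by unfold Pre_create_chunk_summary_text_py; infer_instance
def pvWitness_create_chunk_summary_text_py : (List (List (String × String))) :=
  [[("meta_doc_uuid", "d1"), ("title", "Doc One")], [("meta_doc_uuid", "d1")]]

def Spec_create_chunk_summary_text_py (chunks : List (List (String × String))) (out : String) : Prop := out = create_chunk_summary_text_py_alt chunks
instance (chunks : List (List (String × String))) (out : String) : Decidable (Spec_create_chunk_summary_text_py chunks out) := by unfold Spec_create_chunk_summary_text_py; infer_instance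

-- ===== CLAIM =====
def Claim_equal_create_chunk_summary_text_py : Prop := ∀ (chunks : List (List (String × String))), Dom_create_chunk_summary_text_py chunks → Pre_create_chunk_summary_text_py chunks → Spec_create_chunk_summary_text_py chunks (create_chunk_summary_text_py chunks)

-- ===== LEMMAS AND PROOFS =====

-- appending one element to the sequence extends PySem.List.dedup iff the element is new
lemma pvDedup_snoc (xs : List String) (k : String) :
    PySem.List.dedup (xs ++ [k])
      = if k ∈ xs then PySem.List.dedup xs else PySem.List.dedup xs ++ [k] := by
  have h1 : PySem.List.dedup (xs ++ [k]) = PySem.Set.add (PySem.List.dedup xs) k := by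
    simp only [PySem.List.dedup, PySem.Set.ofList, List.foldl_append, List.foldl_cons,
      List.foldl_nil]
  rw [h1, PySem.Set.add]
  by_cases h : k ∈ xs
  · rw [if_pos h, if_pos]
    simpa [List.contains_iff_mem, PySem.List.mem_dedup] using h
  · rw [if_neg h, if_neg]
    simpa [List.contains_iff_mem, PySem.List.mem_dedup] using h

-- A's grouping dict, characterised: its items are the first-seen-distinct uuids, each paired with
-- the sublist of chunks carrying that uuid
lemma pvA_items (chunks : List (List (String × String))) :
    (chunks.foldl pvStepA PySem.Dict.empty).items
      = (PySem.List.dedup (chunks.map pvKey)).map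
          (fun k => (k, chunks.filter (fun c => pvKey c == k))) := by
  induction chunks using List.reverseRecOn with
  | nil => rfl
  | append_singleton l c ih =>
    rw [List.foldl_append, List.foldl_cons, List.foldl_nil]
    have hkeys : (l.foldl pvStepA PySem.Dict.empty).keys = PySem.List.dedup (l.map pvKey) := by
      simp only [PySem.Dict.keys, ih, List.map_map]
      exact List.map_id _
    have hcont : (l.foldl pvStepA PySem.Dict.empty).contains (pvKey c)
        = decide (pvKey c ∈ PySem.List.dedup (l.map pvKey)) := by
      rw [PySem.Dict.contains_eq_decide_mem_keys, hkeys]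
    by_cases hm : pvKey c ∈ l.map pvKey
    · -- existing document: the group for pvKey c gets c appended
      have hmd : pvKey c ∈ PySem.List.dedup (l.map pvKey) := (PySem.List.mem_dedup _ _).mpr hm
      have hc : (l.foldl pvStepA PySem.Dict.empty).contains (pvKey c) = true := by
        rw [hcont]; exact decide_eq_true hmd
      have hget : (l.foldl pvStepA PySem.Dict.empty).get? (pvKey c)
          = some (l.filter (fun c' => pvKey c' == pvKey c)) := by
        apply PySem.Dict.get?_of_mem_items _ _ (by rw [hkeys]; exact PySem.List.nodup_dedup _)
        rw [ih]
        exact List.mem_map_of_mem hmd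
      have hA : pvStepA (l.foldl pvStepA PySem.Dict.empty) c
          = (l.foldl pvStepA PySem.Dict.empty).insert (pvKey c)
              (l.filter (fun c' => pvKey c' == pvKey c) ++ [c]) := by
        simp only [pvStepA, hc, if_true, PySem.Dict.modify,
          PySem.Dict.getD_eq_get?_getD, hget, Option.getD_some]
      rw [hA, PySem.Dict.items_insert_of_contains _ _ hc, ih]
      simp only [List.map_append, List.map_cons, List.map_nil]
      rw [pvDedup_snoc, if_pos hm, List.map_map]
      apply List.map_congr_left
      intro k _
      by_cases hk : k = pvKey c
      · subst hk
        simp [Function.comp, List.filter_append]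
      · have hb : (k == pvKey c) = false := by simpa using hk
        have hb' : (pvKey c == k) = false := by simpa using (Ne.symm hk)
        simp [Function.comp, hb, hb', List.filter_append]
    · -- new document: a fresh singleton group [(pvKey c, [c])] is appended
      have hmd : pvKey c ∉ PySem.List.dedup (l.map pvKey) := fun h =>
        hm ((PySem.List.mem_dedup _ _).mp h)
      have hc : (l.foldl pvStepA PySem.Dict.empty).contains (pvKey c) = false := by
        rw [hcont]; exact decide_eq_false hmd
      have hA : pvStepA (l.foldl pvStepA PySem.Dict.empty) c
          = (l.foldl pvStepA PySem.Dict.empty).insert (pvKey c) [c] := by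
        simp only [pvStepA, hc, Bool.false_eq_true, if_false, PySem.Dict.modify,
          PySem.Dict.getD_eq_get?_getD]
        rw [PySem.Dict.get?_insert_self, Option.getD_some, List.nil_append,
          PySem.Dict.insert_insert_self]
      have hfil : l.filter (fun c' => pvKey c' == pvKey c) = [] := by
        rw [List.filter_eq_nil_iff]
        intro a ha hb
        exact hm (List.mem_map.mpr ⟨a, ha, eq_of_beq hb⟩)
      rw [hA, PySem.Dict.items_insert_of_not_contains _ _ hc, ih]
      simp only [List.map_append, List.map_cons, List.map_nil]
      rw [pvDedup_snoc, if_neg hm, List.map_append]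
      congr 1
      · apply List.map_congr_left
        intro k hk
        have hne : (pvKey c == k) = false := by
          have : k ≠ pvKey c := fun h => hmd (h ▸ hk)
          simpa using (Ne.symm this)
        simp [List.filter_append, hne]
      · simp [List.filter_append, hfil]

theorem pv_main (chunks : List (List (String × String))) :
    create_chunk_summary_text_py chunks = create_chunk_summary_text_py_alt chunks := by
  by_cases h : chunks = []
  · subst h; rfl
  · unfold create_chunk_summary_text_py create_chunk_summary_text_py_alt
    rw [if_neg h, if_neg h]
    show PySem.Str.join "\n"
        ((List.foldl pvStepA PySem.Dict.empty chunks).items.foldl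
          (fun ps p => ps ++ [pvLine (pvTitle (p.2.headD [])) (p.2.length : Int)]) [])
      = PySem.Str.join "\n"
        ((PySem.List.dedup (chunks.map pvKey)).foldl
          (fun ps doc_uuid =>
            ps ++ [pvLine (pvTitle ((chunks.find? (fun c => pvKey c == doc_uuid)).getD []))
              (chunks.countP (fun c => pvKey c == doc_uuid) : Int)]) [])
    rw [PySem.List.foldl_append_singleton_eq_map
      (fun p : String × List (List (String × String)) =>
        pvLine (pvTitle (p.2.headD [])) ((p.2.length : Int)))]
    rw [PySem.List.foldl_append_singleton_eq_map
      (fun doc_uuid : String =>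
        pvLine (pvTitle ((chunks.find? (fun c => pvKey c == doc_uuid)).getD []))
          ((chunks.countP (fun c => pvKey c == doc_uuid) : Int)))]
    rw [List.nil_append, List.nil_append, pvA_items, List.map_map]
    congr 1
    apply List.map_congr_left
    intro k _
    simp [Function.comp, ← List.head?_filter, List.headD_eq_head?_getD,
      List.countP_eq_length_filter]

-- ===== VERDICT =====
theorem create_chunk_summary_text_py_spec : Claim_equal_create_chunk_summary_text_py := by
  intro chunks _ _
  exact pv_main chunks
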